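-- pv_equiv track=rewrite | github.com/grapheneaffiliate/h4-polytopic-attention | solve_arc_b8.py | solve_63613498
-- ===== SOURCE A (Python) =====
-- def solve_63613498(grid):
--     rows = len(grid)
--     cols = len(grid[0])
--     # Find the 5-cross: horizontal row and vertical column of 5s
--     h_row = -1
--     v_col = -1
--     for r in range(rows):
--         if sum(1 for c in range(cols) if grid[r][c] == 5) > 1:
--             h_row = r
--     for c in range(cols):
--         if sum(1 for r in range(rows) if grid[r][c] == 5) > 1:
--             v_col = c
--     visited = [[False]*cols for _ in range(rows)]
--     components = []
--     def flood_fill(sr, sc, color):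
--         stack = [(sr, sc)]
--         cells = []
--         while stack:
--             r, c = stack.pop()
--             if r < 0 or r >= rows or c < 0 or c >= cols:
--                 continue
--             if visited[r][c] or grid[r][c] != color:
--                 continue
--             visited[r][c] = True
--             cells.append((r, c))
--             for dr, dc in [(-1,0),(1,0),(0,-1),(0,1)]:
--                 stack.append((r+dr, c+dc))
--         return cells
--     for r in range(rows):
--         for c in range(cols):
--             if grid[r][c] != 0 and grid[r][c] != 5 and not visited[r][c]:
--                 cells = flood_fill(r, c, grid[r][c])
--                 components.append((grid[r][c], cells))
--     def normalize(cells):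
--         min_r = min(r for r, c in cells)
--         min_c = min(c for r, c in cells)
--         return frozenset((r - min_r, c - min_c) for r, c in cells)
--     # Template = shape entirely in top-left quadrant (r < h_row and c < v_col)
--     template_shapes = set()
--     for color, cells in components:
--         in_tl = all(r < h_row and c < v_col for r, c in cells)
--         if in_tl:
--             template_shapes.add(normalize(cells))
--     result = [row[:] for row in grid]
--     for color, cells in components:
--         in_tl = all(r < h_row and c < v_col for r, c in cells)
--         if not in_tl:
--             shape = normalize(cells)
--             if shape in template_shapes:
--                 for r, c in cells:
--                     result[r][c] = 5
--     return result
-- ===== SOURCE B (Python) =====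
-- def solve_63613498(grid):
--     rows = len(grid)
--     cols = len(grid[0])
--     # 5-cross detection: last row/column containing at least two 5s
--     h_candidates = [r for r in range(rows) if len([c for c in range(cols) if grid[r][c] == 5]) >= 2]
--     h_row = h_candidates[-1] if h_candidates else -1
--     v_candidates = [c for c in range(cols) if len([r for r in range(rows) if grid[r][c] == 5]) >= 2]
--     v_col = v_candidates[-1] if v_candidates else -1
--     # Connected components by raster-scan blob merging (union-find on sets of cells):
--     # each colored cell starts as its own blob and is unioned with the blobs of its
--     # up/left neighbours of the same color.
--     comps = []  # list of (color, set of (r, c)) blobs, pairwise disjoint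
--     for r in range(rows):
--         for c in range(cols):
--             v = grid[r][c]
--             if v == 0 or v == 5:
--                 continue
--             merged = {(r, c)}
--             rest = []
--             for color, cs in comps:
--                 if color == v and ((r - 1, c) in cs or (r, c - 1) in cs):
--                     merged |= cs
--                 else:
--                     rest.append((color, cs))
--             rest.append((v, merged))
--             comps = rest
--     def norm(cs):
--         mr = min(r for r, c in cs)
--         mc = min(c for r, c in cs)
--         return frozenset((r - mr, c - mc) for r, c in cs)
--     def in_tl(cs):
--         return all(r < h_row and c < v_col for r, c in cs)
--     templates = {norm(cs) for color, cs in comps if in_tl(cs)}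
--     result = [list(row) for row in grid]
--     for color, cs in comps:
--         if not in_tl(cs) and norm(cs) in templates:
--             for r, c in cs:
--                 result[r][c] = 5
--     return result
-- ===== Notes on version B (the rewrite author's own statement) =====
-- stated objective: alternative
-- what changed: Connected components are computed by a single raster scan that keeps a list of disjoint cell-set blobs and unions each colored cell's blob with the blobs of its same-colored up/left neighbours (merge-based union-find), instead of A's stack-based DFS flood fill over a visited matrix; the 5-cross detection is reformulated as last-of-filter and the recoloring works off the blob sets.
import Mathlib
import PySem

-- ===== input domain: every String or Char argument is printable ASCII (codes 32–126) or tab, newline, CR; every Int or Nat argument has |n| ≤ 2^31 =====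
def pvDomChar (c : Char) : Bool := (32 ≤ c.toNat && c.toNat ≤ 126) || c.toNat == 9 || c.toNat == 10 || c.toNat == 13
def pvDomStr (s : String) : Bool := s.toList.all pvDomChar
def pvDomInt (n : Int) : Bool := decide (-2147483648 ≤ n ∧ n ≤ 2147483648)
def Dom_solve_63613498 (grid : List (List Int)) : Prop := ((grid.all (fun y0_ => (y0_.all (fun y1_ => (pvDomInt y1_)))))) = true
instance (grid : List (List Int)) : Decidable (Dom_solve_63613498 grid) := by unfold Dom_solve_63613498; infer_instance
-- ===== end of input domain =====

-- B replaces A's DFS flood fill by a raster-scan blob-merging (union-of-sets) connected-component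
-- labelling; same return value, no speed claim (objective: alternative).

-- ===== shared primitive models (used by both ports) =====

-- grid[r][c] (in bounds under Pre_)
def pvGet (grid : List (List Int)) (r c : Int) : Int :=
  PySem.List.pyGetD (PySem.List.pyGetD grid r []) c 0

-- model of Python's frozenset of int pairs: a canonical duplicate-free list
-- (row-major scan of the bounding box), so that Lean list equality = Python frozenset equality
def pvMinD (l : List Int) : Int := (l.min?).getD 0
def pvMaxD (l : List Int) : Int := (l.max?).getD 0
def pvFrozen (l : List (Int × Int)) : List (Int × Int) :=
  (PySem.List.pyRange (pvMinD (l.map (·.1))) (pvMaxD (l.map (·.1)) + 1) 1).flatMap (fun a =>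
    (PySem.List.pyRange (pvMinD (l.map (·.2))) (pvMaxD (l.map (·.2)) + 1) 1).filterMap (fun b =>
      if (a, b) ∈ l then some (a, b) else none))

-- normalize(cells): min-translate, then frozenset (identical helper in both Pythons)
def pvNormalize (cells : List (Int × Int)) : List (Int × Int) :=
  let mr := pvMinD (cells.map (·.1))
  let mc := pvMinD (cells.map (·.2))
  pvFrozen (cells.map (fun p => (p.1 - mr, p.2 - mc)))

-- all(r < h_row and c < v_col for r, c in cells)
def pvInTL (h v : Int) (cells : List (Int × Int)) : Bool :=
  cells.all (fun p => decide (p.1 < h ∧ p.2 < v))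

-- result[r][c] = 5
def pvSet5 (res : List (List Int)) (p : Int × Int) : List (List Int) :=
  PySem.List.pySetD res p.1 (PySem.List.pySetD (PySem.List.pyGetD res p.1 []) p.2 (5 : Int))

-- ===== PORT A =====

def pvVGet (v : List (List Bool)) (r c : Int) : Bool :=
  PySem.List.pyGetD (PySem.List.pyGetD v r []) c false
def pvVSet (v : List (List Bool)) (r c : Int) : List (List Bool) :=
  PySem.List.pySetD v r (PySem.List.pySetD (PySem.List.pyGetD v r []) c true)

-- flood_fill: stack kept top-first (Python pops the LAST element; pushes reversed accordingly);
-- the fuel argument only makes the while-loop structurally recursive — it is never exhausted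
-- under Pre_ (proved below); when the stack is empty the loop stops regardless of fuel.
def pvFloodA (grid : List (List Int)) (rows cols color : Int) :
    Nat → List (Int × Int) → List (List Bool) → List (Int × Int) →
    (List (Int × Int) × List (List Bool))
  | _, [], v, cells => (cells, v)
  | 0, _ :: _, v, cells => (cells, v)
  | fuel + 1, (r, c) :: st, v, cells =>
      if r < 0 ∨ r ≥ rows ∨ c < 0 ∨ c ≥ cols then
        pvFloodA grid rows cols color fuel st v cells
      else if pvVGet v r c = true ∨ pvGet grid r c ≠ color then
        pvFloodA grid rows cols color fuel st v cells
      else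
        pvFloodA grid rows cols color fuel
          ((r, c + 1) :: (r, c - 1) :: (r + 1, c) :: (r - 1, c) :: st)
          (pvVSet v r c) (cells ++ [(r, c)])

-- the double scan collecting components ('for r … for c … if colored and not visited: flood')
def pvScanA (grid : List (List Int)) (rows cols : Int) (fuel : Nat) :
    (List (List Bool)) × List (Int × List (Int × Int)) :=
  (PySem.List.pyRange 0 rows 1).foldl (fun st r =>
    (PySem.List.pyRange 0 cols 1).foldl (fun st c =>
      let g := pvGet grid r c
      if g ≠ 0 ∧ g ≠ 5 ∧ pvVGet st.1 r c = false then
        let fc := pvFloodA grid rows cols g fuel [(r, c)] st.1 []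
        (fc.2, st.2 ++ [(g, fc.1)])
      else st) st)
    (List.replicate rows.toNat (List.replicate cols.toNat false), [])

def solve_63613498 (grid : List (List Int)) : List (List Int) :=
  let rows : Int := grid.length
  let cols : Int := (PySem.List.pyGetD grid 0 []).length
  let h_row : Int := (PySem.List.pyRange 0 rows 1).foldl (fun h r =>
    if ((PySem.List.pyRange 0 cols 1).foldl
        (fun a c => if pvGet grid r c = 5 then a + 1 else a) (0 : Int)) > 1 then r else h) (-1)
  let v_col : Int := (PySem.List.pyRange 0 cols 1).foldl (fun h c =>
    if ((PySem.List.pyRange 0 rows 1).foldl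
        (fun a r => if pvGet grid r c = 5 then a + 1 else a) (0 : Int)) > 1 then c else h) (-1)
  let components := (pvScanA grid rows cols (5 * (rows.toNat * cols.toNat) + 2)).2
  let templates := components.foldl (fun t e =>
    if pvInTL h_row v_col e.2 then PySem.Set.add t (pvNormalize e.2) else t)
    ([] : List (List (Int × Int)))
  -- result = [row[:] for row in grid] is the identity on immutable lists
  components.foldl (fun res e =>
    if !pvInTL h_row v_col e.2 && PySem.Set.contains templates (pvNormalize e.2) then
      e.2.foldl pvSet5 res
    else res) grid

-- ===== PORT B =====

-- one raster-scan step: union the new cell's blob with the blobs of its up/left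
-- same-colored neighbours, keeping all other blobs
def pvMergeStep (grid : List (List Int)) (r c : Int)
    (comps : List (Int × List (Int × Int))) : List (Int × List (Int × Int)) :=
  let v := pvGet grid r c
  if v = 0 ∨ v = 5 then comps
  else
    let mr := comps.foldl (fun (s : List (Int × Int) × List (Int × List (Int × Int))) e =>
      if e.1 = v ∧ ((r - 1, c) ∈ e.2 ∨ (r, c - 1) ∈ e.2) then
        (PySem.Set.union s.1 e.2, s.2)
      else (s.1, s.2 ++ [e]))
      (PySem.Set.ofList [(r, c)], ([] : List (Int × List (Int × Int))))
    mr.2 ++ [(v, mr.1)]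

def solve_63613498_alt (grid : List (List Int)) : List (List Int) :=
  let rows : Int := grid.length
  let cols : Int := (PySem.List.pyGetD grid 0 []).length
  let hc := (PySem.List.pyRange 0 rows 1).filter (fun r =>
    2 ≤ ((PySem.List.pyRange 0 cols 1).filter (fun c => pvGet grid r c == 5)).length)
  let h_row : Int := (PySem.List.pyGet? hc (-1)).getD (-1)   -- hc[-1] if hc else -1
  let vc := (PySem.List.pyRange 0 cols 1).filter (fun c =>
    2 ≤ ((PySem.List.pyRange 0 rows 1).filter (fun r => pvGet grid r c == 5)).length)
  let v_col : Int := (PySem.List.pyGet? vc (-1)).getD (-1)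
  let comps := (PySem.List.pyRange 0 rows 1).foldl (fun cs r =>
    (PySem.List.pyRange 0 cols 1).foldl (fun cs c => pvMergeStep grid r c cs) cs)
    ([] : List (Int × List (Int × Int)))
  let templates := comps.foldl (fun t e =>
    if pvInTL h_row v_col e.2 then PySem.Set.add t (pvNormalize e.2) else t)
    ([] : List (List (Int × Int)))
  -- result = [list(row) for row in grid] is the identity on immutable lists
  comps.foldl (fun res e =>
    if !pvInTL h_row v_col e.2 && PySem.Set.contains templates (pvNormalize e.2) then
      e.2.foldl pvSet5 res
    else res) grid

-- ===== PRECONDITION & SPEC =====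
-- Pre_ excludes exactly the raising inputs: the empty grid (grid[0] → IndexError) and grids
-- with a row shorter than the first row (grid[r][c] → IndexError); rows LONGER than the first
-- are admitted (A scans only the first len(grid[0]) entries and copies the rest).
def Pre_solve_63613498 (grid : List (List Int)) : Prop :=
  grid ≠ [] ∧ ∀ row ∈ grid, (PySem.List.pyGetD grid 0 []).length ≤ row.length
instance (grid : List (List Int)) : Decidable (Pre_solve_63613498 grid) := by
  unfold Pre_solve_63613498; infer_instance

def pvWitness_solve_63613498 : List (List Int) :=
  [[1, 1, 0, 5, 0, 0], [0, 1, 0, 5, 0, 0], [5, 5, 5, 5, 5, 5], [0, 0, 0, 5, 1, 1], [0, 0, 0, 5, 0, 1]]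

def Spec_solve_63613498 (grid : List (List Int)) (out : List (List Int)) : Prop := out = solve_63613498_alt grid
instance (grid : List (List Int)) (out : List (List Int)) : Decidable (Spec_solve_63613498 grid out) := by unfold Spec_solve_63613498; infer_instance

-- ===== CLAIM (what is proved, stated in full; the proofs are below) =====
def Claim_equal_solve_63613498 : Prop := ∀ (grid : List (List Int)), Dom_solve_63613498 grid → Pre_solve_63613498 grid → Spec_solve_63613498 grid (solve_63613498 grid)

-- ===== LEMMAS AND PROOFS =====

-- ---- basic geometry on cells ----

def pvCols (grid : List (List Int)) : Nat := (PySem.List.pyGetD grid 0 []).length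

def pvInB (grid : List (List Int)) (p : Int × Int) : Prop :=
  0 ≤ p.1 ∧ p.1 < (grid.length : Int) ∧ 0 ≤ p.2 ∧ p.2 < (pvCols grid : Int)

def pvVal (grid : List (List Int)) (p : Int × Int) : Int := pvGet grid p.1 p.2

def pvColored (grid : List (List Int)) (p : Int × Int) : Prop :=
  pvInB grid p ∧ pvVal grid p ≠ 0 ∧ pvVal grid p ≠ 5

def pvNbr (p q : Int × Int) : Prop :=
  q = (p.1, p.2 + 1) ∨ q = (p.1, p.2 - 1) ∨ q = (p.1 + 1, p.2) ∨ q = (p.1 - 1, p.2)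

def pvAdj (grid : List (List Int)) (p q : Int × Int) : Prop :=
  pvColored grid p ∧ pvColored grid q ∧ pvVal grid p = pvVal grid q ∧ pvNbr p q

def pvReach (grid : List (List Int)) : Int × Int → Int × Int → Prop :=
  Relation.ReflTransGen (pvAdj grid)

theorem pvNbr_symm {p q : Int × Int} (h : pvNbr p q) : pvNbr q p := by
  obtain ⟨a, b⟩ := p; obtain ⟨x, y⟩ := q
  simp only [pvNbr, Prod.mk.injEq] at h ⊢
  omega

theorem pvAdj_symm {grid : List (List Int)} {p q : Int × Int} (h : pvAdj grid p q) :
    pvAdj grid q p :=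
  ⟨h.2.1, h.1, h.2.2.1.symm, pvNbr_symm h.2.2.2⟩

theorem pvReach_symm {grid : List (List Int)} {p q : Int × Int} (h : pvReach grid p q) :
    pvReach grid q p :=
  Relation.ReflTransGen.symmetric (fun _ _ hx => pvAdj_symm hx) h

theorem pvReach_trans {grid : List (List Int)} {p q r : Int × Int}
    (h1 : pvReach grid p q) (h2 : pvReach grid q r) : pvReach grid p r :=
  Relation.ReflTransGen.trans h1 h2

theorem pvColored_of_reach {grid : List (List Int)} {p q : Int × Int}
    (h : pvReach grid p q) (hp : pvColored grid p) : pvColored grid q := by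
  induction h with
  | refl => exact hp
  | tail _ hadj _ => exact hadj.2.1

-- ---- connectivity classes ----

def pvIsClass (grid : List (List Int)) (s : List (Int × Int)) : Prop :=
  ∃ p0, pvColored grid p0 ∧ ∀ q, q ∈ s ↔ pvReach grid p0 q

def pvClassList (grid : List (List Int)) (L : List (Int × List (Int × Int))) : Prop :=
  (∀ e ∈ L, pvIsClass grid e.2) ∧ (∀ p, pvColored grid p → ∃ e ∈ L, p ∈ e.2)

theorem pvIsClass_colored {grid : List (List Int)} {s : List (Int × Int)}
    (h : pvIsClass grid s) : ∀ p ∈ s, pvColored grid p := by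
  obtain ⟨p0, hp0, hc⟩ := h
  intro p hp
  exact pvColored_of_reach ((hc p).1 hp) hp0

theorem pvIsClass_eq_of_mem {grid : List (List Int)} {s t : List (Int × Int)} {p : Int × Int}
    (h1 : pvIsClass grid s) (h2 : pvIsClass grid t) (hs : p ∈ s) (ht : p ∈ t) :
    ∀ q, q ∈ s ↔ q ∈ t := by
  obtain ⟨a, _, hca⟩ := h1
  obtain ⟨b, _, hcb⟩ := h2
  intro q
  rw [hca, hcb]
  have hap : pvReach grid a p := (hca p).1 hs
  have hbp : pvReach grid b p := (hcb p).1 ht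
  constructor
  · intro h; exact pvReach_trans (pvReach_trans hbp (pvReach_symm hap)) h
  · intro h; exact pvReach_trans (pvReach_trans hap (pvReach_symm hbp)) h

-- ---- congruence of the set-like post-processing in the cell set ----

theorem pvInTL_congr {s t : List (Int × Int)} (a b : Int) (h : ∀ x, x ∈ s ↔ x ∈ t) :
    pvInTL a b s = pvInTL a b t := by
  unfold pvInTL
  rw [Bool.eq_iff_iff]
  simp only [List.all_eq_true, decide_eq_true_eq]
  exact ⟨fun hh x hx => hh x ((h x).2 hx), fun hh x hx => hh x ((h x).1 hx)⟩

theorem pvMin?_congr {l1 l2 : List Int} (h : ∀ x, x ∈ l1 ↔ x ∈ l2) : l1.min? = l2.min? := by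
  cases hm : l2.min? with
  | none =>
      rw [List.min?_eq_none_iff] at hm
      subst hm
      rw [List.min?_eq_none_iff]
      cases l1 with
      | nil => rfl
      | cons x xs => exact absurd ((h x).1 (by simp)) (by simp)
  | some m =>
      rw [List.min?_eq_some_iff] at hm
      rw [List.min?_eq_some_iff]
      exact ⟨(h m).2 hm.1, fun b hb => hm.2 b ((h b).1 hb)⟩

theorem pvMax?_congr {l1 l2 : List Int} (h : ∀ x, x ∈ l1 ↔ x ∈ l2) : l1.max? = l2.max? := by
  cases hm : l2.max? with
  | none =>
      rw [List.max?_eq_none_iff] at hm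
      subst hm
      rw [List.max?_eq_none_iff]
      cases l1 with
      | nil => rfl
      | cons x xs => exact absurd ((h x).1 (by simp)) (by simp)
  | some m =>
      rw [List.max?_eq_some_iff] at hm
      rw [List.max?_eq_some_iff]
      exact ⟨(h m).2 hm.1, fun b hb => hm.2 b ((h b).1 hb)⟩

theorem pvMap_mem_congr {α β : Type} {s t : List α} (f : α → β) (h : ∀ x, x ∈ s ↔ x ∈ t) :
    ∀ y, y ∈ s.map f ↔ y ∈ t.map f := by
  intro y
  simp only [List.mem_map]
  constructor
  · rintro ⟨x, hx, rfl⟩; exact ⟨x, (h x).1 hx, rfl⟩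
  · rintro ⟨x, hx, rfl⟩; exact ⟨x, (h x).2 hx, rfl⟩

theorem pvFrozen_congr {s t : List (Int × Int)} (h : ∀ x, x ∈ s ↔ x ∈ t) :
    pvFrozen s = pvFrozen t := by
  unfold pvFrozen pvMinD pvMaxD
  have e1 : (s.map (fun x => x.1)).min? = (t.map (fun x => x.1)).min? :=
    pvMin?_congr (pvMap_mem_congr _ h)
  have e2 : (s.map (fun x => x.1)).max? = (t.map (fun x => x.1)).max? :=
    pvMax?_congr (pvMap_mem_congr _ h)
  have e3 : (s.map (fun x => x.2)).min? = (t.map (fun x => x.2)).min? :=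
    pvMin?_congr (pvMap_mem_congr _ h)
  have e4 : (s.map (fun x => x.2)).max? = (t.map (fun x => x.2)).max? :=
    pvMax?_congr (pvMap_mem_congr _ h)
  rw [e1, e2, e3, e4]
  have hfun : (fun (a : Int) => List.filterMap
        (fun b => if (a, b) ∈ s then some (a, b) else none)
        (PySem.List.pyRange ((t.map (fun x => x.2)).min?.getD 0)
          ((t.map (fun x => x.2)).max?.getD 0 + 1) 1)) =
      (fun (a : Int) => List.filterMap
        (fun b => if (a, b) ∈ t then some (a, b) else none)
        (PySem.List.pyRange ((t.map (fun x => x.2)).min?.getD 0)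
          ((t.map (fun x => x.2)).max?.getD 0 + 1) 1)) := by
    funext a
    congr 1
    funext b
    by_cases hab : (a, b) ∈ s
    · rw [if_pos hab, if_pos ((h _).1 hab)]
    · rw [if_neg hab, if_neg (fun hx => hab ((h _).2 hx))]
  rw [hfun]

theorem pvNormalize_congr {s t : List (Int × Int)} (h : ∀ x, x ∈ s ↔ x ∈ t) :
    pvNormalize s = pvNormalize t := by
  unfold pvNormalize pvMinD
  rw [pvMin?_congr (pvMap_mem_congr _ h), pvMin?_congr (pvMap_mem_congr (·.2) h)]
  exact pvFrozen_congr (pvMap_mem_congr _ h)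



-- ---- the common post-processing (template set + recoloring) ----

def pvTset (h v : Int) (L : List (Int × List (Int × Int))) : List (List (Int × Int)) :=
  L.foldl (fun t e => if pvInTL h v e.2 then PySem.Set.add t (pvNormalize e.2) else t) []

def pvQ (h v : Int) (L : List (Int × List (Int × Int))) (e : Int × List (Int × Int)) : Bool :=
  !pvInTL h v e.2 && PySem.Set.contains (pvTset h v L) (pvNormalize e.2)

def pvFinish (grid : List (List Int)) (h v : Int) (L : List (Int × List (Int × Int))) :
    List (List Int) :=
  L.foldl (fun res e => if pvQ h v L e then e.2.foldl pvSet5 res else res) grid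

theorem pvTset_mem_aux (h v : Int) (L : List (Int × List (Int × Int)))
    (t0 : List (List (Int × Int))) (x : List (Int × Int)) :
    x ∈ L.foldl (fun t e => if pvInTL h v e.2 then PySem.Set.add t (pvNormalize e.2) else t) t0 ↔
      x ∈ t0 ∨ ∃ e ∈ L, pvInTL h v e.2 = true ∧ pvNormalize e.2 = x := by
  induction L generalizing t0 with
  | nil => simp
  | cons e es ih =>
      simp only [List.foldl_cons]
      rw [ih]
      by_cases he : pvInTL h v e.2 = true
      · rw [if_pos he, PySem.Set.mem_add]
        simp only [List.mem_cons]
        constructor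
        · rintro ((h1 | h1) | ⟨e', he', h5, h6⟩)
          · exact Or.inl h1
          · exact Or.inr ⟨e, Or.inl rfl, he, h1.symm⟩
          · exact Or.inr ⟨e', Or.inr he', h5, h6⟩
        · rintro (h1 | ⟨e', (rfl | he'), h5, h6⟩)
          · exact Or.inl (Or.inl h1)
          · exact Or.inl (Or.inr h6.symm)
          · exact Or.inr ⟨e', he', h5, h6⟩
      · rw [if_neg he]
        simp only [List.mem_cons]
        constructor
        · rintro (h1 | ⟨e', he', h5, h6⟩)
          · exact Or.inl h1
          · exact Or.inr ⟨e', Or.inr he', h5, h6⟩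
        · rintro (h1 | ⟨e', (rfl | he'), h5, h6⟩)
          · exact Or.inl h1
          · exact absurd h5 he
          · exact Or.inr ⟨e', he', h5, h6⟩

theorem pvTset_mem (h v : Int) (L : List (Int × List (Int × Int))) (x : List (Int × Int)) :
    x ∈ pvTset h v L ↔ ∃ e ∈ L, pvInTL h v e.2 = true ∧ pvNormalize e.2 = x := by
  rw [pvTset, pvTset_mem_aux]
  simp

-- class lists induce the same template sets
theorem pvTset_transfer_sub {grid : List (List Int)} {L1 L2 : List (Int × List (Int × Int))}
    (h1 : pvClassList grid L1) (h2 : pvClassList grid L2) (h v : Int) (x : List (Int × Int)) :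
    x ∈ pvTset h v L1 → x ∈ pvTset h v L2 := by
  intro hx
  rw [pvTset_mem] at hx ⊢
  obtain ⟨e, he, htl, hnorm⟩ := hx
  have hcl := h1.1 e he
  obtain ⟨p0, hp0, hchar⟩ := hcl
  have hp0mem : p0 ∈ e.2 := (hchar p0).2 Relation.ReflTransGen.refl
  obtain ⟨e', he', hp0mem'⟩ := h2.2 p0 hp0
  have hiff := pvIsClass_eq_of_mem ⟨p0, hp0, hchar⟩ (h2.1 e' he') hp0mem hp0mem'
  refine ⟨e', he', ?_, ?_⟩
  · rw [← pvInTL_congr h v hiff]; exact htl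
  · rw [← pvNormalize_congr hiff]; exact hnorm

theorem pvQ_transfer {grid : List (List Int)} {L1 L2 : List (Int × List (Int × Int))}
    (h1 : pvClassList grid L1) (h2 : pvClassList grid L2) (h v : Int)
    {e e' : Int × List (Int × Int)} (hiff : ∀ q, q ∈ e.2 ↔ q ∈ e'.2) :
    pvQ h v L1 e = true → pvQ h v L2 e' = true := by
  intro hq
  rw [pvQ, Bool.and_eq_true, Bool.not_eq_true'] at hq ⊢
  obtain ⟨ha, hb⟩ := hq
  constructor
  · rw [← pvInTL_congr h v hiff]; exact ha
  · rw [PySem.Set.contains_iff] at hb ⊢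
    rw [← pvNormalize_congr hiff]
    exact pvTset_transfer_sub h1 h2 h v _ hb


-- ---- pointwise description of the recoloring folds ----

def pvEget (res : List (List Int)) (i j : Nat) : Int := (res.getD i []).getD j 0

def pvSettable (res : List (List Int)) (p : Int × Int) : Prop :=
  0 ≤ p.1 ∧ p.1 < (res.length : Int) ∧ 0 ≤ p.2 ∧
    p.2 < (((res.getD p.1.toNat []).length : Nat) : Int)

theorem pvPyGetD_nonneg {α : Type} (xs : List α) {i : Int} (d : α) (h : 0 ≤ i) :
    PySem.List.pyGetD xs i d = xs.getD i.toNat d := by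
  rw [show i = ((i.toNat : Nat) : Int) from (Int.toNat_of_nonneg h).symm,
    PySem.List.pyGetD_natCast]
  simp [max_eq_left h]

theorem pvGetD_set {α : Type} (l : List α) (n i : Nat) (a d : α) :
    (l.set n a).getD i d = if i = n ∧ n < l.length then a else l.getD i d := by
  by_cases h : i = n ∧ n < l.length
  · obtain ⟨rfl, hlt⟩ := h
    rw [if_pos ⟨rfl, hlt⟩, List.getD_eq_getElem _ _ (by simpa using hlt),
      List.getElem_set_self]
  · rw [if_neg h]
    by_cases hin : i = n
    · subst hin
      have hnl : ¬ i < l.length := fun hh => h ⟨rfl, hh⟩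
      rw [List.getD_eq_default _ _ (by simpa using Nat.le_of_not_lt hnl),
        List.getD_eq_default _ _ (Nat.le_of_not_lt hnl)]
    · by_cases hi : i < l.length
      · rw [List.getD_eq_getElem _ _ (by simpa using hi), List.getD_eq_getElem _ _ hi,
          List.getElem_set_ne (by omega)]
      · rw [List.getD_eq_default _ _ (by simpa using Nat.le_of_not_lt hi),
          List.getD_eq_default _ _ (Nat.le_of_not_lt hi)]

theorem pvSet5_unfold (res : List (List Int)) (p : Int × Int) (h1 : 0 ≤ p.1) (h2 : 0 ≤ p.2) :
    pvSet5 res p = res.set p.1.toNat ((res.getD p.1.toNat []).set p.2.toNat 5) := by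
  unfold pvSet5
  rw [PySem.List.pySetD_of_nonneg _ _ h1, PySem.List.pySetD_of_nonneg _ _ h2,
    pvPyGetD_nonneg _ _ h1]

theorem pvSet5_length (res : List (List Int)) (p : Int × Int) :
    (pvSet5 res p).length = res.length := by
  unfold pvSet5
  rw [PySem.List.length_pySetD]

theorem pvSet5_rowlen (res : List (List Int)) (p : Int × Int) (h1 : 0 ≤ p.1) (h2 : 0 ≤ p.2)
    (i : Nat) : ((pvSet5 res p).getD i []).length = (res.getD i []).length := by
  rw [pvSet5_unfold res p h1 h2, pvGetD_set]
  by_cases h : i = p.1.toNat ∧ p.1.toNat < res.length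
  · rw [if_pos h, List.length_set, h.1]
  · rw [if_neg h]

theorem pvEget_set5 (res : List (List Int)) (p : Int × Int) (hs : pvSettable res p)
    (i j : Nat) :
    pvEget (pvSet5 res p) i j = if p = ((i : Int), (j : Int)) then 5 else pvEget res i j := by
  obtain ⟨h1, h2, h3, h4⟩ := hs
  rw [pvSet5_unfold res p h1 h3]
  unfold pvEget
  rw [pvGetD_set]
  by_cases hip : i = p.1.toNat ∧ p.1.toNat < res.length
  · rw [if_pos hip, pvGetD_set]
    by_cases hjp : j = p.2.toNat ∧ p.2.toNat < (res.getD p.1.toNat []).length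
    · rw [if_pos hjp,
        if_pos (show p = ((i : Int), (j : Int)) by
          obtain ⟨a, b⟩ := p
          simp only [Prod.mk.injEq]
          simp only at h1 h3
          obtain ⟨hi1, _⟩ := hip
          obtain ⟨hj1, _⟩ := hjp
          omega)]
    · rw [if_neg (show ¬ p = ((i : Int), (j : Int)) by
          intro hh
          apply hjp
          obtain ⟨a, b⟩ := p
          simp only [Prod.mk.injEq] at hh
          simp only at h3 h4 ⊢
          constructor
          · omega
          · omega), hip.1]
      rw [if_neg hjp]
  · rw [if_neg (show ¬ p = ((i : Int), (j : Int)) by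
        intro hh
        apply hip
        obtain ⟨a, b⟩ := p
        simp only [Prod.mk.injEq] at hh
        simp only at h1 h2 ⊢
        constructor
        · omega
        · omega)]
    rw [if_neg hip]

theorem pvSettable_shape {res res' : List (List Int)} (hlen : res'.length = res.length)
    (hrow : ∀ i : Nat, (res'.getD i []).length = (res.getD i []).length) (p : Int × Int)
    (hs : pvSettable res p) : pvSettable res' p := by
  obtain ⟨a, b, c, d⟩ := hs
  exact ⟨a, by rw [hlen]; exact b, c, by rw [hrow]; exact d⟩

theorem pvFoldlSet5_length (ps : List (Int × Int)) (res : List (List Int)) :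
    (ps.foldl pvSet5 res).length = res.length := by
  induction ps generalizing res with
  | nil => rfl
  | cons p ps ih => rw [List.foldl_cons, ih, pvSet5_length]

theorem pvFoldlSet5_rowlen (ps : List (Int × Int)) (res : List (List Int))
    (hps : ∀ p ∈ ps, 0 ≤ p.1 ∧ 0 ≤ p.2) (i : Nat) :
    ((ps.foldl pvSet5 res).getD i []).length = (res.getD i []).length := by
  induction ps generalizing res with
  | nil => rfl
  | cons p ps ih =>
      have hp := hps p (by simp)
      rw [List.foldl_cons, ih _ (fun q hq => hps q (by simp [hq])),
        pvSet5_rowlen _ _ hp.1 hp.2]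

theorem pvEget_foldlSet5 (ps : List (Int × Int)) (res : List (List Int))
    (hps : ∀ p ∈ ps, pvSettable res p) (i j : Nat) :
    pvEget (ps.foldl pvSet5 res) i j =
      if ((i : Int), (j : Int)) ∈ ps then 5 else pvEget res i j := by
  induction ps generalizing res with
  | nil => simp
  | cons p ps ih =>
      have hp := hps p (by simp)
      have hps' : ∀ q ∈ ps, pvSettable (pvSet5 res p) q := by
        intro q hq
        exact pvSettable_shape (pvSet5_length res p)
          (pvSet5_rowlen res p hp.1 hp.2.2.1) q (hps q (by simp [hq]))
      rw [List.foldl_cons, ih _ hps']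
      by_cases hmem : ((i : Int), (j : Int)) ∈ ps
      · rw [if_pos hmem, if_pos (by simp [hmem])]
      · rw [if_neg hmem, pvEget_set5 res p hp i j]
        by_cases hpe : p = ((i : Int), (j : Int))
        · rw [if_pos hpe, if_pos (by simp [hpe.symm])]
        · rw [if_neg hpe, if_neg (by simp [hmem]; exact fun hx => hpe hx.symm)]


def pvGshape (grid res : List (List Int)) : Prop :=
  res.length = grid.length ∧ ∀ i : Nat, (res.getD i []).length = (grid.getD i []).length

theorem pvSettable_of_colored {grid res : List (List Int)} {p : Int × Int}
    (hpre : Pre_solve_63613498 grid) (hsh : pvGshape grid res) (hcol : pvColored grid p) :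
    pvSettable res p := by
  obtain ⟨⟨h1, h2, h3, h4⟩, _, _⟩ := hcol
  refine ⟨h1, by rw [hsh.1]; exact h2, h3, ?_⟩
  rw [hsh.2]
  have hlt : p.1.toNat < grid.length := by omega
  have hmem : grid.getD p.1.toNat [] ∈ grid := by
    rw [List.getD_eq_getElem _ _ hlt]
    exact List.getElem_mem hlt
  have := hpre.2 _ hmem
  unfold pvCols at h4
  omega

theorem pvRecolor_length (Q : Int × List (Int × Int) → Bool) (L : List (Int × List (Int × Int)))
    (res : List (List Int)) :
    (L.foldl (fun res e => if Q e then e.2.foldl pvSet5 res else res) res).length =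
      res.length := by
  induction L generalizing res with
  | nil => rfl
  | cons e es ih =>
      rw [List.foldl_cons, ih]
      by_cases hq : Q e
      · rw [if_pos hq, pvFoldlSet5_length]
      · rw [if_neg hq]

theorem pvRecolor_rowlen (Q : Int × List (Int × Int) → Bool) (L : List (Int × List (Int × Int)))
    (res : List (List Int)) (hc : ∀ e ∈ L, ∀ p ∈ e.2, 0 ≤ p.1 ∧ 0 ≤ p.2) (i : Nat) :
    ((L.foldl (fun res e => if Q e then e.2.foldl pvSet5 res else res) res).getD i []).length =
      (res.getD i []).length := by
  induction L generalizing res with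
  | nil => rfl
  | cons e es ih =>
      rw [List.foldl_cons, ih _ (fun e' he' => hc e' (by simp [he']))]
      by_cases hq : Q e
      · rw [if_pos hq, pvFoldlSet5_rowlen _ _ (hc e (by simp))]
      · rw [if_neg hq]

theorem pvEget_recolor (Q : Int × List (Int × Int) → Bool) (L : List (Int × List (Int × Int)))
    (res : List (List Int)) (hset : ∀ e ∈ L, ∀ p ∈ e.2, pvSettable res p) (i j : Nat) :
    pvEget (L.foldl (fun res e => if Q e then e.2.foldl pvSet5 res else res) res) i j =
      if ∃ e ∈ L, Q e = true ∧ ((i : Int), (j : Int)) ∈ e.2 then 5 else pvEget res i j := by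
  induction L generalizing res with
  | nil => simp
  | cons e es ih =>
      rw [List.foldl_cons]
      by_cases hq : Q e = true
      · rw [if_pos hq]
        have hnn : ∀ p ∈ e.2, 0 ≤ p.1 ∧ 0 ≤ p.2 := by
          intro p hp
          have := hset e (by simp) p hp
          exact ⟨this.1, this.2.2.1⟩
        have hset' : ∀ e' ∈ es, ∀ p ∈ e'.2, pvSettable (e.2.foldl pvSet5 res) p := by
          intro e' he' p hp
          exact pvSettable_shape (pvFoldlSet5_length e.2 res)
            (pvFoldlSet5_rowlen e.2 res hnn) p (hset e' (by simp [he']) p hp)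
        rw [ih _ hset']
        by_cases hex : ∃ e' ∈ es, Q e' = true ∧ ((i : Int), (j : Int)) ∈ e'.2
        · rw [if_pos hex]
          obtain ⟨e', he', hq', hm'⟩ := hex
          rw [if_pos ⟨e', List.mem_cons_of_mem _ he', hq', hm'⟩]
        · rw [if_neg hex, pvEget_foldlSet5 _ _ (hset e (by simp))]
          by_cases hmem : ((i : Int), (j : Int)) ∈ e.2
          · rw [if_pos hmem, if_pos ⟨e, List.mem_cons_self, hq, hmem⟩]
          · rw [if_neg hmem, if_neg ?_]
            rintro ⟨e', he', hq', hm'⟩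
            rcases List.mem_cons.1 he' with rfl | he'
            · exact hmem hm'
            · exact hex ⟨e', he', hq', hm'⟩
      · rw [if_neg hq, ih _ (fun e' he' => hset e' (by simp [he']))]
        by_cases hex : ∃ e' ∈ es, Q e' = true ∧ ((i : Int), (j : Int)) ∈ e'.2
        · rw [if_pos hex]
          obtain ⟨e', he', hq', hm'⟩ := hex
          rw [if_pos ⟨e', List.mem_cons_of_mem _ he', hq', hm'⟩]
        · rw [if_neg hex, if_neg ?_]
          rintro ⟨e', he', hq', hm'⟩
          rcases List.mem_cons.1 he' with rfl | he'
          · exact hq hq'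
          · exact hex ⟨e', he', hq', hm'⟩

theorem pvGshape_refl (grid : List (List Int)) : pvGshape grid grid := ⟨rfl, fun _ => rfl⟩

theorem pvFinish_gshape {grid : List (List Int)} (h v : Int) (L : List (Int × List (Int × Int)))
    (hc : ∀ e ∈ L, ∀ p ∈ e.2, 0 ≤ p.1 ∧ 0 ≤ p.2) : pvGshape grid (pvFinish grid h v L) :=
  ⟨pvRecolor_length _ _ _, pvRecolor_rowlen _ _ _ hc⟩

-- two class lists produce the same final grid
theorem pvFinish_classlist_eq {grid : List (List Int)} (hpre : Pre_solve_63613498 grid)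
    (h v : Int) {L1 L2 : List (Int × List (Int × Int))}
    (hL1 : pvClassList grid L1) (hL2 : pvClassList grid L2) :
    pvFinish grid h v L1 = pvFinish grid h v L2 := by
  have hcol1 : ∀ e ∈ L1, ∀ p ∈ e.2, pvColored grid p :=
    fun e he => pvIsClass_colored (hL1.1 e he)
  have hcol2 : ∀ e ∈ L2, ∀ p ∈ e.2, pvColored grid p :=
    fun e he => pvIsClass_colored (hL2.1 e he)
  have hnn1 : ∀ e ∈ L1, ∀ p ∈ e.2, 0 ≤ p.1 ∧ 0 ≤ p.2 := by
    intro e he p hp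
    have := (hcol1 e he p hp).1
    exact ⟨this.1, this.2.2.1⟩
  have hnn2 : ∀ e ∈ L2, ∀ p ∈ e.2, 0 ≤ p.1 ∧ 0 ≤ p.2 := by
    intro e he p hp
    have := (hcol2 e he p hp).1
    exact ⟨this.1, this.2.2.1⟩
  have hset1 : ∀ e ∈ L1, ∀ p ∈ e.2, pvSettable grid p :=
    fun e he p hp => pvSettable_of_colored hpre (pvGshape_refl grid) (hcol1 e he p hp)
  have hset2 : ∀ e ∈ L2, ∀ p ∈ e.2, pvSettable grid p :=
    fun e he p hp => pvSettable_of_colored hpre (pvGshape_refl grid) (hcol2 e he p hp)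
  have hsh1 := pvFinish_gshape (grid := grid) h v L1 hnn1
  have hsh2 := pvFinish_gshape (grid := grid) h v L2 hnn2
  have hcond : ∀ (i j : Nat),
      (∃ e ∈ L1, pvQ h v L1 e = true ∧ ((i : Int), (j : Int)) ∈ e.2) ↔
      (∃ e ∈ L2, pvQ h v L2 e = true ∧ ((i : Int), (j : Int)) ∈ e.2) := by
    intro i j
    constructor
    · rintro ⟨e, he, hq, hm⟩
      have hp : pvColored grid ((i : Int), (j : Int)) := hcol1 e he _ hm
      obtain ⟨e', he', hm'⟩ := hL2.2 _ hp
      have hiff := pvIsClass_eq_of_mem (hL1.1 e he) (hL2.1 e' he') hm hm'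
      exact ⟨e', he', pvQ_transfer hL1 hL2 h v hiff hq, hm'⟩
    · rintro ⟨e, he, hq, hm⟩
      have hp : pvColored grid ((i : Int), (j : Int)) := hcol2 e he _ hm
      obtain ⟨e', he', hm'⟩ := hL1.2 _ hp
      have hiff := pvIsClass_eq_of_mem (hL2.1 e he) (hL1.1 e' he') hm hm'
      exact ⟨e', he', pvQ_transfer hL2 hL1 h v hiff hq, hm'⟩
  apply List.ext_getElem
  · rw [hsh1.1, hsh2.1]
  · intro n h1 h2
    apply List.ext_getElem
    · rw [← List.getD_eq_getElem _ ([] : List Int) h1, ← List.getD_eq_getElem _ ([] : List Int) h2,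
        hsh1.2, hsh2.2]
    · intro m hm1 hm2
      have e1 : (pvFinish grid h v L1)[n][m] = pvEget (pvFinish grid h v L1) n m := by
        unfold pvEget
        rw [List.getD_eq_getElem _ _ h1, List.getD_eq_getElem _ _ hm1]
      have e2 : (pvFinish grid h v L2)[n][m] = pvEget (pvFinish grid h v L2) n m := by
        unfold pvEget
        rw [List.getD_eq_getElem _ _ h2, List.getD_eq_getElem _ _ hm2]
      rw [e1, e2]
      unfold pvFinish
      rw [pvEget_recolor _ _ _ hset1, pvEget_recolor _ _ _ hset2]
      by_cases hc1 : ∃ e ∈ L1, pvQ h v L1 e = true ∧ ((n : Int), (m : Int)) ∈ e.2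
      · rw [if_pos hc1, if_pos ((hcond n m).1 hc1)]
      · rw [if_neg hc1, if_neg (fun hc2 => hc1 ((hcond n m).2 hc2))]


-- ---- the two 5-cross detections agree ----

theorem pvFoldl_update_last (l : List Int) (P : Int → Prop) [DecidablePred P] (a : Int) :
    l.foldl (fun h r => if P r then r else h) a =
      ((l.filter (fun r => decide (P r))).getLast?).getD a := by
  induction l generalizing a with
  | nil => rfl
  | cons x xs ih =>
      rw [List.foldl_cons, List.filter_cons]
      by_cases hp : P x
      · rw [if_pos hp, if_pos (by simpa using hp), ih, List.getLast?_cons]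
        simp
      · rw [if_neg hp, if_neg (by simpa using hp), ih]

theorem pvCross_eq (outer inner : List Int) (g : Int → Int → Int) :
    outer.foldl (fun h r =>
        if (inner.foldl (fun a c => if g r c = 5 then a + 1 else a) (0 : Int)) > 1 then r else h)
      (-1) =
    (PySem.List.pyGet? (outer.filter
        (fun r => 2 ≤ (inner.filter (fun c => g r c == 5)).length)) (-1)).getD (-1) := by
  rw [PySem.List.pyGet?_neg_one,
    pvFoldl_update_last outer
      (fun r => (inner.foldl (fun a c => if g r c = 5 then a + 1 else a) (0 : Int)) > 1) (-1)]
  congr 2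
  apply List.filter_congr
  intro r _
  rw [PySem.List.foldl_ite_add_one (fun c => g r c = 5) inner 0, decide_eq_decide,
    List.countP_eq_length_filter]
  have hpred : (fun c => decide (g r c = 5)) = (fun c => g r c == 5) := by
    funext c
    exact Bool.eq_iff_iff.2 (by simp)
  rw [hpred]
  omega


-- ---- correctness of the raster-scan blob merging (port B) ----

def pvRasterLT (p q : Int × Int) : Prop := p.1 < q.1 ∨ (p.1 = q.1 ∧ p.2 < q.2)

def pvPositions (R C : Int) : List (Int × Int) :=
  (PySem.List.pyRange 0 R 1).flatMap (fun r => (PySem.List.pyRange 0 C 1).map (fun c => (r, c)))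

theorem pvMem_positions (R C : Int) (p : Int × Int) :
    p ∈ pvPositions R C ↔ 0 ≤ p.1 ∧ p.1 < R ∧ 0 ≤ p.2 ∧ p.2 < C := by
  unfold pvPositions
  simp only [List.mem_flatMap, List.mem_map, PySem.List.mem_pyRange_one]
  constructor
  · rintro ⟨r, ⟨h1, h2⟩, c, ⟨h3, h4⟩, rfl⟩
    exact ⟨h1, h2, h3, h4⟩
  · rintro ⟨h1, h2, h3, h4⟩
    exact ⟨p.1, ⟨h1, h2⟩, p.2, ⟨h3, h4⟩, rfl⟩

theorem pvPositions_pairwise (R C : Int) : (pvPositions R C).Pairwise pvRasterLT := by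
  unfold pvPositions
  rw [List.pairwise_flatMap]
  constructor
  · intro r _
    rw [List.pairwise_map]
    exact (PySem.List.pairwise_lt_pyRange_one 0 C).imp (fun h => Or.inr ⟨rfl, h⟩)
  · exact (PySem.List.pairwise_lt_pyRange_one 0 R).imp (fun h x hx y hy => by
      simp only [List.mem_map] at hx hy
      obtain ⟨c1, _, rfl⟩ := hx
      obtain ⟨c2, _, rfl⟩ := hy
      exact Or.inl h)

-- invariant of the raster scan
def pvMInv (grid : List (List Int)) (done : List (Int × Int))
    (comps : List (Int × List (Int × Int))) : Prop :=
  (∀ e ∈ comps, ∀ p ∈ e.2, pvColored grid p ∧ pvVal grid p = e.1 ∧ p ∈ done) ∧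
  (∀ p ∈ done, pvColored grid p → ∃ e ∈ comps, p ∈ e.2) ∧
  (∀ e ∈ comps, ∀ p ∈ e.2, ∀ q ∈ e.2, pvReach grid p q) ∧
  (∀ e ∈ comps, ∀ p ∈ e.2, ∀ q, pvAdj grid p q → q ∈ done → q ∈ e.2) ∧
  (∀ e ∈ comps, e.2 ≠ [])

-- membership/shape of the inner merging fold
theorem pvMergeAcc_spec (v r c : Int) (comps : List (Int × List (Int × Int)))
    (acc : List (Int × Int) × List (Int × List (Int × Int))) (hnodup : acc.1.Nodup) :
    (∀ q, q ∈ (comps.foldl (fun (s : List (Int × Int) × List (Int × List (Int × Int))) e =>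
        if e.1 = v ∧ ((r - 1, c) ∈ e.2 ∨ (r, c - 1) ∈ e.2) then
          (PySem.Set.union s.1 e.2, s.2)
        else (s.1, s.2 ++ [e])) acc).1 ↔
      q ∈ acc.1 ∨ ∃ e ∈ comps, (e.1 = v ∧ ((r - 1, c) ∈ e.2 ∨ (r, c - 1) ∈ e.2)) ∧ q ∈ e.2) ∧
    (comps.foldl (fun (s : List (Int × Int) × List (Int × List (Int × Int))) e =>
        if e.1 = v ∧ ((r - 1, c) ∈ e.2 ∨ (r, c - 1) ∈ e.2) then
          (PySem.Set.union s.1 e.2, s.2)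
        else (s.1, s.2 ++ [e])) acc).2 =
      acc.2 ++ comps.filter (fun e => !decide (e.1 = v ∧ ((r - 1, c) ∈ e.2 ∨ (r, c - 1) ∈ e.2))) := by
  induction comps generalizing acc with
  | nil => simp
  | cons e es ih =>
      simp only [List.foldl_cons]
      by_cases ht : e.1 = v ∧ ((r - 1, c) ∈ e.2 ∨ (r, c - 1) ∈ e.2)
      · rw [if_pos ht]
        have hih := ih (PySem.Set.union acc.1 e.2, acc.2)
          (PySem.Set.nodup_union acc.1 e.2 hnodup)
        refine ⟨fun q => ?_, ?_⟩
        · rw [(hih.1 q)]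
          simp only [PySem.Set.mem_union, List.mem_cons]
          constructor
          · rintro ((h1 | h1) | ⟨e', he', h2, h3⟩)
            · exact Or.inl h1
            · exact Or.inr ⟨e, Or.inl rfl, ht, h1⟩
            · exact Or.inr ⟨e', Or.inr he', h2, h3⟩
          · rintro (h1 | ⟨e', (rfl | he'), h2, h3⟩)
            · exact Or.inl (Or.inl h1)
            · exact Or.inl (Or.inr h3)
            · exact Or.inr ⟨e', he', h2, h3⟩
        · rw [hih.2, List.filter_cons, if_neg (by simp [ht])]
      · rw [if_neg ht]
        have hih := ih (acc.1, acc.2 ++ [e]) hnodup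
        refine ⟨fun q => ?_, ?_⟩
        · rw [(hih.1 q)]
          simp only [List.mem_cons]
          constructor
          · rintro (h1 | ⟨e', he', h2, h3⟩)
            · exact Or.inl h1
            · exact Or.inr ⟨e', Or.inr he', h2, h3⟩
          · rintro (h1 | ⟨e', (rfl | he'), h2, h3⟩)
            · exact Or.inl h1
            · exact absurd h2 ht
            · exact Or.inr ⟨e', he', h2, h3⟩
        · rw [hih.2, List.filter_cons, if_pos (by simp [ht]), List.append_assoc]
          rfl

theorem pvMergeStep_inv (grid : List (List Int)) (done : List (Int × Int))
    (comps : List (Int × List (Int × Int))) (r c : Int)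
    (hinv : pvMInv grid done comps) (hInB : pvInB grid (r, c))
    (hdoneLT : ∀ p ∈ done, pvRasterLT p (r, c)) :
    pvMInv grid (done ++ [(r, c)]) (pvMergeStep grid r c comps) := by
  obtain ⟨m1, m2, m3, m4, m5⟩ := hinv
  unfold pvMergeStep
  by_cases hv : pvGet grid r c = 0 ∨ pvGet grid r c = 5
  · rw [if_pos hv]
    have hnc : ¬ pvColored grid (r, c) := by
      rintro ⟨_, hv0, hv5⟩
      rcases hv with h | h
      · exact hv0 h
      · exact hv5 h
    refine ⟨?_, ?_, m3, ?_, m5⟩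
    · intro e he p hp
      obtain ⟨a, b, cdone⟩ := m1 e he p hp
      exact ⟨a, b, List.mem_append_left _ cdone⟩
    · intro p hp hcp
      rcases List.mem_append.1 hp with hp | hp
      · exact m2 p hp hcp
      · rw [List.mem_singleton.1 hp] at hcp
        exact absurd hcp hnc
    · intro e he p hp q hadj hq
      rcases List.mem_append.1 hq with hq | hq
      · exact m4 e he p hp q hadj hq
      · rw [List.mem_singleton.1 hq] at hadj
        exact absurd hadj.2.1 hnc
  · rw [if_neg hv]
    push Not at hv
    have hcolrc : pvColored grid (r, c) := ⟨hInB, hv.1, hv.2⟩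
    obtain ⟨hmem, hrest⟩ := pvMergeAcc_spec (pvGet grid r c) r c comps
      (PySem.Set.ofList [(r, c)], []) (PySem.Set.nodup_ofList _)
    set res := comps.foldl (fun (s : List (Int × Int) × List (Int × List (Int × Int))) e =>
      if e.1 = pvGet grid r c ∧ ((r - 1, c) ∈ e.2 ∨ (r, c - 1) ∈ e.2) then
        (PySem.Set.union s.1 e.2, s.2)
      else (s.1, s.2 ++ [e])) (PySem.Set.ofList [(r, c)], []) with hres
    have hmem' : ∀ q, q ∈ res.1 ↔ q = (r, c) ∨
        ∃ e ∈ comps, (e.1 = pvGet grid r c ∧ ((r - 1, c) ∈ e.2 ∨ (r, c - 1) ∈ e.2)) ∧ q ∈ e.2 := by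
      intro q
      rw [hmem q]
      constructor
      · rintro (h1 | h1)
        · left
          have := (PySem.Set.mem_ofList [(r, c)] q).1 h1
          simpa using this
        · exact Or.inr h1
      · rintro (rfl | h1)
        · exact Or.inl ((PySem.Set.mem_ofList [(r, c)] _).2 (by simp))
        · exact Or.inr h1
    have hrest' : res.2 = comps.filter
        (fun e => !decide (e.1 = pvGet grid r c ∧ ((r - 1, c) ∈ e.2 ∨ (r, c - 1) ∈ e.2))) := by
      rw [hrest]
      rfl
    have hnbr_done : ∀ q, pvAdj grid (r, c) q → q ∈ done → q = (r - 1, c) ∨ q = (r, c - 1) := by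
      intro q hadj hq
      have hlt := hdoneLT q hq
      rcases hadj.2.2.2 with h | h | h | h <;> subst h <;>
        simp only [pvRasterLT] at hlt
      · exfalso; omega
      · exact Or.inr rfl
      · exfalso; omega
      · exact Or.inl rfl
    have hreach : ∀ q ∈ res.1, pvReach grid q (r, c) := by
      intro q hq
      rcases (hmem' q).1 hq with rfl | ⟨e, he, ht, hqe⟩
      · exact Relation.ReflTransGen.refl
      · obtain ⟨htv, hw⟩ := ht
        have hstep : ∀ w ∈ e.2, pvNbr w (r, c) → pvReach grid q (r, c) := by
          intro w hwe hnbr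
          have hcw := m1 e he w hwe
          have hadj : pvAdj grid w (r, c) := by
            refine ⟨hcw.1, hcolrc, ?_, hnbr⟩
            rw [hcw.2.1, htv]
            rfl
          exact Relation.ReflTransGen.tail (m3 e he q hqe w hwe) hadj
        rcases hw with hw | hw
        · exact hstep _ hw (Or.inr (Or.inr (Or.inl (by simp))))
        · exact hstep _ hw (Or.inl (by simp))
    refine ⟨?_, ?_, ?_, ?_, ?_⟩
    · -- M1
      intro e he p hp
      rcases List.mem_append.1 he with he | he
      · rw [hrest'] at he
        have hef := List.mem_filter.1 he
        obtain ⟨a, b, cdone⟩ := m1 e hef.1 p hp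
        exact ⟨a, b, List.mem_append_left _ cdone⟩
      · rcases List.mem_singleton.1 he with rfl
        rcases (hmem' p).1 hp with rfl | ⟨e', he', ht', hpe'⟩
        · exact ⟨hcolrc, rfl, List.mem_append_right _ (by simp)⟩
        · obtain ⟨a, b, cdone⟩ := m1 e' he' p hpe'
          refine ⟨a, ?_, List.mem_append_left _ cdone⟩
          rw [b, ht'.1]
    · -- M2
      intro p hp hcp
      rcases List.mem_append.1 hp with hp | hp
      · obtain ⟨e, he, hpe⟩ := m2 p hp hcp
        by_cases ht : e.1 = pvGet grid r c ∧ ((r - 1, c) ∈ e.2 ∨ (r, c - 1) ∈ e.2)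
        · exact ⟨(pvGet grid r c, res.1), List.mem_append_right _ (by simp),
            (hmem' p).2 (Or.inr ⟨e, he, ht, hpe⟩)⟩
        · refine ⟨e, List.mem_append_left _ ?_, hpe⟩
          rw [hrest']
          exact List.mem_filter.2 ⟨he, by simp [ht]⟩
      · rcases List.mem_singleton.1 hp with rfl
        exact ⟨(pvGet grid r c, res.1), List.mem_append_right _ (by simp),
          (hmem' _).2 (Or.inl rfl)⟩
    · -- M3
      intro e he p hp q hq
      rcases List.mem_append.1 he with he | he
      · rw [hrest'] at he
        exact m3 e (List.mem_filter.1 he).1 p hp q hq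
      · rcases List.mem_singleton.1 he with rfl
        exact pvReach_trans (hreach p hp) (pvReach_symm (hreach q hq))
    · -- M4
      intro e he p hp q hadj hq
      rcases List.mem_append.1 he with he | he
      · rw [hrest'] at he
        have hef := List.mem_filter.1 he
        have hnt : ¬ (e.1 = pvGet grid r c ∧ ((r - 1, c) ∈ e.2 ∨ (r, c - 1) ∈ e.2)) := by
          have h2 := hef.2
          simp only [Bool.not_eq_eq_eq_not, Bool.not_true, decide_eq_false_iff_not] at h2
          exact h2
        rcases List.mem_append.1 hq with hq | hq
        · exact m4 e hef.1 p hp q hadj hq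
        · exfalso
          rcases List.mem_singleton.1 hq with rfl
          have hpdone := (m1 e hef.1 p hp).2.2
          have hpn := hnbr_done p (pvAdj_symm hadj) hpdone
          apply hnt
          constructor
          · have h1 : pvVal grid p = e.1 := (m1 e hef.1 p hp).2.1
            have h2 : pvVal grid p = pvVal grid (r, c) := hadj.2.2.1
            rw [← h1, h2]
            rfl
          · rcases hpn with rfl | rfl
            · exact Or.inl hp
            · exact Or.inr hp
      · rcases List.mem_singleton.1 he with rfl
        rcases List.mem_append.1 hq with hq | hq
        · rcases (hmem' p).1 hp with rfl | ⟨e', he', ht', hpe'⟩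
          · have hcq := hadj.2.1
            obtain ⟨e', he', hqe'⟩ := m2 q hq hcq
            have hqn := hnbr_done q hadj hq
            have ht' : e'.1 = pvGet grid r c ∧ ((r - 1, c) ∈ e'.2 ∨ (r, c - 1) ∈ e'.2) := by
              constructor
              · have h1 : pvVal grid q = e'.1 := (m1 e' he' q hqe').2.1
                have h2 : pvVal grid (r, c) = pvVal grid q := hadj.2.2.1
                rw [← h1, ← h2]
                rfl
              · rcases hqn with rfl | rfl
                · exact Or.inl hqe'
                · exact Or.inr hqe'
            exact (hmem' q).2 (Or.inr ⟨e', he', ht', hqe'⟩)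
          · exact (hmem' q).2 (Or.inr ⟨e', he', ht', m4 e' he' p hpe' q hadj hq⟩)
        · rcases List.mem_singleton.1 hq with rfl
          exact (hmem' _).2 (Or.inl rfl)
    · -- M5
      intro e he
      rcases List.mem_append.1 he with he | he
      · rw [hrest'] at he
        exact m5 e (List.mem_filter.1 he).1
      · rcases List.mem_singleton.1 he with rfl
        intro hnil
        have hmm := (hmem' (r, c)).2 (Or.inl rfl)
        have hnil' : res.1 = [] := hnil
        rw [hnil'] at hmm
        exact List.not_mem_nil hmm


theorem pvMergeScan_inv (grid : List (List Int)) :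
    ∀ (ps done : List (Int × Int)) (comps : List (Int × List (Int × Int))),
      pvPositions (grid.length : Int) ((pvCols grid : Nat) : Int) = done ++ ps →
      pvMInv grid done comps →
      pvMInv grid (done ++ ps)
        (ps.foldl (fun cs p => pvMergeStep grid p.1 p.2 cs) comps) := by
  intro ps
  induction ps with
  | nil =>
      intro done comps _ hinv
      simpa using hinv
  | cons p ps ih =>
      intro done comps heq hinv
      have hpair : (done ++ p :: ps).Pairwise pvRasterLT := by
        rw [← heq]
        exact pvPositions_pairwise _ _
      have hdoneLT : ∀ x ∈ done, pvRasterLT x p :=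
        fun x hx => (List.pairwise_append.1 hpair).2.2 x hx p (by simp)
      have hpmem : p ∈ pvPositions (grid.length : Int) ((pvCols grid : Nat) : Int) := by
        rw [heq]
        simp
      have hInB : pvInB grid p := by
        have := (pvMem_positions _ _ p).1 hpmem
        exact ⟨this.1, this.2.1, this.2.2.1, this.2.2.2⟩
      have hstep := pvMergeStep_inv grid done comps p.1 p.2 hinv (by simpa using hInB) hdoneLT
      have heq' : pvPositions (grid.length : Int) ((pvCols grid : Nat) : Int) =
          (done ++ [p]) ++ ps := by
        rw [heq, List.append_assoc]
        rfl
      have := ih (done ++ [p]) (pvMergeStep grid p.1 p.2 comps) heq' (by simpa using hstep)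
      rw [List.foldl_cons]
      have harr : (done ++ [p]) ++ ps = done ++ p :: ps := by
        rw [List.append_assoc]
        rfl
      rw [harr] at this
      exact this

def pvCompsB (grid : List (List Int)) : List (Int × List (Int × Int)) :=
  (PySem.List.pyRange 0 (grid.length : Int) 1).foldl (fun cs r =>
    (PySem.List.pyRange 0 (((PySem.List.pyGetD grid 0 []).length : Nat) : Int) 1).foldl
      (fun cs c => pvMergeStep grid r c cs) cs)
    ([] : List (Int × List (Int × Int)))

theorem pvCompsB_eq_flat (grid : List (List Int)) :
    pvCompsB grid =
      (pvPositions (grid.length : Int) ((pvCols grid : Nat) : Int)).foldl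
        (fun cs p => pvMergeStep grid p.1 p.2 cs) [] := by
  unfold pvCompsB pvPositions pvCols
  rw [List.foldl_flatMap]
  simp only [List.foldl_map]

theorem pvCompsB_classes (grid : List (List Int)) : pvClassList grid (pvCompsB grid) := by
  have hinv := pvMergeScan_inv grid
    (pvPositions (grid.length : Int) ((pvCols grid : Nat) : Int)) [] [] rfl
    (by refine ⟨?_, ?_, ?_, ?_, ?_⟩ <;> simp)
  rw [← pvCompsB_eq_flat] at hinv
  simp only [List.nil_append] at hinv
  obtain ⟨m1, m2, m3, m4, m5⟩ := hinv
  constructor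
  · intro e he
    obtain ⟨p0, hp0⟩ := List.exists_mem_of_ne_nil _ (m5 e he)
    refine ⟨p0, (m1 e he p0 hp0).1, fun q => ⟨fun hq => m3 e he p0 hp0 q hq, fun hq => ?_⟩⟩
    induction hq with
    | refl => exact hp0
    | tail hr hadj ihq =>
        refine m4 e he _ ihq _ hadj ?_
        have hc := hadj.2.1
        exact (pvMem_positions _ _ _).2 ⟨hc.1.1, hc.1.2.1, hc.1.2.2.1, hc.1.2.2.2⟩
  · intro p hp
    refine m2 p ?_ hp
    exact (pvMem_positions _ _ _).2 ⟨hp.1.1, hp.1.2.1, hp.1.2.2.1, hp.1.2.2.2⟩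


-- ---- correctness of the DFS flood fill (port A) ----

def pvVrep (grid : List (List Int)) (v : List (List Bool)) (p : Int × Int) : Prop :=
  pvInB grid p ∧ pvVGet v p.1 p.2 = true

def pvShapeV (grid : List (List Int)) (v : List (List Bool)) : Prop :=
  v.length = grid.length ∧ ∀ row ∈ v, row.length = pvCols grid

def pvCF (v : List (List Bool)) : Nat := (v.map (fun row => row.count false)).sum

theorem pvVGet_eq (v : List (List Bool)) {r c : Int} (h0 : 0 ≤ r) (h2 : 0 ≤ c) :
    pvVGet v r c = (v.getD r.toNat []).getD c.toNat false := by
  unfold pvVGet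
  rw [pvPyGetD_nonneg _ _ h0, pvPyGetD_nonneg _ _ h2]

theorem pvVSet_unfold (v : List (List Bool)) {r c : Int} (h0 : 0 ≤ r) (h2 : 0 ≤ c) :
    pvVSet v r c = v.set r.toNat ((v.getD r.toNat []).set c.toNat true) := by
  unfold pvVSet
  rw [PySem.List.pySetD_of_nonneg _ _ h0, PySem.List.pySetD_of_nonneg _ _ h2,
    pvPyGetD_nonneg _ _ h0]

theorem pvShapeV_set {grid : List (List Int)} {v : List (List Bool)} (hs : pvShapeV grid v)
    {r c : Int} (h0 : 0 ≤ r) (h2 : 0 ≤ c) : pvShapeV grid (pvVSet v r c) := by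
  rw [pvVSet_unfold v h0 h2]
  refine ⟨by rw [List.length_set]; exact hs.1, ?_⟩
  intro row hrow
  by_cases hr : r.toNat < v.length
  · rcases List.mem_or_eq_of_mem_set hrow with h | h
    · exact hs.2 row h
    · subst h
      rw [List.length_set]
      exact hs.2 _ (by rw [List.getD_eq_getElem _ _ hr]; exact List.getElem_mem hr)
  · rw [List.set_eq_of_length_le (Nat.le_of_not_lt hr)] at hrow
    exact hs.2 row hrow

theorem pvVrep_vset {grid : List (List Int)} {v : List (List Bool)} (hs : pvShapeV grid v)
    {r c : Int} (hin : pvInB grid (r, c)) (q : Int × Int) :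
    pvVrep grid (pvVSet v r c) q ↔ q = (r, c) ∨ pvVrep grid v q := by
  obtain ⟨h0, h1, h2, h3⟩ := hin
  simp only at h0 h1 h2 h3
  have hrn : r.toNat < v.length := by rw [hs.1]; omega
  have hrowlen : (v.getD r.toNat []).length = pvCols grid :=
    hs.2 _ (by rw [List.getD_eq_getElem _ _ hrn]; exact List.getElem_mem hrn)
  have hcn : c.toNat < (v.getD r.toNat []).length := by rw [hrowlen]; omega
  rw [pvVSet_unfold v h0 h2]
  constructor
  · rintro ⟨hq, hget⟩
    rw [pvVGet_eq _ hq.1 hq.2.2.1, pvGetD_set] at hget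
    by_cases hqr : q.1.toNat = r.toNat ∧ r.toNat < v.length
    · rw [if_pos hqr, pvGetD_set] at hget
      by_cases hqc : q.2.toNat = c.toNat ∧ c.toNat < (v.getD r.toNat []).length
      · left
        obtain ⟨a, b⟩ := q
        simp only [Prod.mk.injEq]
        obtain ⟨ha, _, hb, _⟩ := hq
        simp only at ha hb
        constructor
        · omega
        · omega
      · rw [if_neg hqc] at hget
        right
        refine ⟨hq, ?_⟩
        rw [pvVGet_eq _ hq.1 hq.2.2.1, hqr.1]
        exact hget
    · rw [if_neg hqr] at hget
      right
      exact ⟨hq, by rw [pvVGet_eq _ hq.1 hq.2.2.1]; exact hget⟩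
  · rintro (rfl | ⟨hq, hget⟩)
    · refine ⟨⟨h0, by simpa using h1, h2, by simpa using h3⟩, ?_⟩
      rw [pvVGet_eq _ h0 h2, pvGetD_set, if_pos ⟨rfl, hrn⟩, pvGetD_set, if_pos ⟨rfl, hcn⟩]
    · refine ⟨hq, ?_⟩
      rw [pvVGet_eq _ hq.1 hq.2.2.1, pvGetD_set]
      by_cases hqr : q.1.toNat = r.toNat ∧ r.toNat < v.length
      · rw [if_pos hqr, pvGetD_set]
        by_cases hqc : q.2.toNat = c.toNat ∧ c.toNat < (v.getD r.toNat []).length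
        · -- q = (r, c); then the entry was already true, fine (result is true anyway)
          rw [if_pos hqc]
        · rw [if_neg hqc]
          rw [pvVGet_eq _ hq.1 hq.2.2.1, hqr.1] at hget
          exact hget
      · rw [if_neg hqr]
        rw [pvVGet_eq _ hq.1 hq.2.2.1] at hget
        exact hget

theorem pvSum_map_set {α : Type} (l : List α) (f : α → Nat) :
    ∀ (n : Nat) (a : α) (hn : n < l.length),
      ((l.set n a).map f).sum + f (l[n]) = (l.map f).sum + f a := by
  induction l with
  | nil => intro n a hn; simp at hn
  | cons x xs ih =>
      intro n a hn
      cases n with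
      | zero => simp [List.set_cons_zero]; omega
      | succ m =>
          rw [List.set_cons_succ]
          simp only [List.map_cons, List.sum_cons, List.getElem_cons_succ]
          have := ih m a (by rw [List.length_cons] at hn; omega)
          omega

theorem pvCF_vset {grid : List (List Int)} {v : List (List Bool)} (hs : pvShapeV grid v)
    {r c : Int} (hin : pvInB grid (r, c)) (hfalse : pvVGet v r c = false) :
    pvCF (pvVSet v r c) + 1 = pvCF v := by
  obtain ⟨h0, h1, h2, h3⟩ := hin
  simp only at h0 h1 h2 h3
  have hrn : r.toNat < v.length := by rw [hs.1]; omega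
  have hrowlen : v[r.toNat].length = pvCols grid :=
    hs.2 _ (List.getElem_mem hrn)
  have hcn : c.toNat < v[r.toNat].length := by rw [hrowlen]; omega
  have hentry : v[r.toNat][c.toNat] = false := by
    rw [pvVGet_eq _ h0 h2, List.getD_eq_getElem _ _ hrn, List.getD_eq_getElem _ _ hcn] at hfalse
    exact hfalse
  have hpos : 0 < v[r.toNat].count false := by
    rw [List.count_pos_iff, ← hentry]
    exact List.getElem_mem hcn
  have hcount : (v[r.toNat].set c.toNat true).count false + 1 = v[r.toNat].count false := by
    rw [List.count_set hcn]
    simp [hentry]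
    omega
  unfold pvCF
  rw [pvVSet_unfold v h0 h2, List.getD_eq_getElem _ _ hrn]
  have hss := pvSum_map_set v (fun row => row.count false) r.toNat
    (v[r.toNat].set c.toNat true) hrn
  simp only at hss
  omega

theorem pvSum_count_le (C : Nat) :
    ∀ (v : List (List Bool)), (∀ row ∈ v, row.length = C) →
      (v.map (fun row => row.count false)).sum ≤ v.length * C := by
  intro v
  induction v with
  | nil => simp
  | cons row rows ih =>
      intro h
      simp only [List.map_cons, List.sum_cons, List.length_cons]
      have h1 : row.count false ≤ C := by
        rw [← h row (by simp)]
        exact List.count_le_length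
      have h2 := ih (fun r hr => h r (by simp [hr]))
      calc row.count false + (rows.map (fun row => row.count false)).sum
          ≤ C + rows.length * C := by omega
        _ = (rows.length + 1) * C := by ring

theorem pvCF_le {grid : List (List Int)} {v : List (List Bool)} (hs : pvShapeV grid v) :
    pvCF v ≤ grid.length * pvCols grid := by
  unfold pvCF
  rw [← hs.1]
  exact pvSum_count_le (pvCols grid) v hs.2


structure pvFInv (grid : List (List Int)) (color : Int) (seed : Int × Int)
    (v0 : List (List Bool)) (st : List (Int × Int)) (v : List (List Bool))
    (cells : List (Int × Int)) : Prop where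
  shape : pvShapeV grid v
  vmono : ∀ p, pvVrep grid v0 p → pvVrep grid v p
  vdecomp : ∀ p, pvVrep grid v p → pvVrep grid v0 p ∨ p ∈ cells
  cellsVis : ∀ p ∈ cells, pvVrep grid v p
  cellsNew : ∀ p ∈ cells, ¬ pvVrep grid v0 p
  cellsGood : ∀ p ∈ cells, pvColored grid p ∧ pvVal grid p = color ∧ pvReach grid seed p
  frontier : ∀ p ∈ cells, ∀ q, pvNbr p q → pvInB grid q → pvVal grid q = color →
    (q ∈ st ∨ pvVrep grid v q)
  origin : ∀ q ∈ st, q = seed ∨ ∃ p ∈ cells, pvNbr p q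
  seedTrack : pvVrep grid v seed ∨ seed ∈ st

theorem pvFloodA_run (grid : List (List Int)) (color : Int) (seed : Int × Int)
    (v0 : List (List Bool)) (hseedc : pvColored grid seed)
    (hseedcol : pvVal grid seed = color) :
    ∀ (fuel : Nat) (st : List (Int × Int)) (v : List (List Bool)) (cells : List (Int × Int)),
      pvFInv grid color seed v0 st v cells →
      5 * pvCF v + st.length < fuel →
      pvFInv grid color seed v0 []
        (pvFloodA grid (grid.length : Int) ((pvCols grid : Nat) : Int) color fuel st v cells).2
        (pvFloodA grid (grid.length : Int) ((pvCols grid : Nat) : Int) color fuel st v cells).1 := by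
  intro fuel
  induction fuel with
  | zero =>
      intro st v cells _ hf
      omega
  | succ fuel ih =>
      intro st v cells hinv hfuel
      cases st with
      | nil =>
          simp only [pvFloodA]
          exact hinv
      | cons hd tl =>
          obtain ⟨r, c⟩ := hd
          simp only [pvFloodA]
          by_cases hc1 : r < 0 ∨ r ≥ (grid.length : Int) ∨ c < 0 ∨ c ≥ ((pvCols grid : Nat) : Int)
          · rw [if_pos hc1]
            refine ih tl v cells ⟨hinv.shape, hinv.vmono, hinv.vdecomp, hinv.cellsVis,
              hinv.cellsNew, hinv.cellsGood, ?_, ?_, ?_⟩ (by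
                simp only [List.length_cons] at hfuel
                omega)
            · intro p hp q hnbr hq hqc
              rcases hinv.frontier p hp q hnbr hq hqc with hmem | hv
              · rcases List.mem_cons.1 hmem with rfl | hmem
                · exfalso
                  obtain ⟨a1, a2, a3, a4⟩ := hq
                  simp only at a1 a2 a3 a4
                  rcases hc1 with h | h | h | h <;> omega
                · exact Or.inl hmem
              · exact Or.inr hv
            · intro q hq
              exact hinv.origin q (List.mem_cons_of_mem _ hq)
            · rcases hinv.seedTrack with hv | hmem
              · exact Or.inl hv
              · rcases List.mem_cons.1 hmem with heq | hmem
                · exfalso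
                  obtain ⟨a1, a2, a3, a4⟩ := hseedc.1
                  rw [heq] at a1 a2 a3 a4
                  simp only at a1 a2 a3 a4
                  rcases hc1 with h | h | h | h <;> omega
                · exact Or.inr hmem
          · rw [if_neg hc1]
            push Not at hc1
            obtain ⟨b1, b2, b3, b4⟩ := hc1
            have hinb : pvInB grid (r, c) := ⟨b1, b2, b3, b4⟩
            by_cases hc2 : pvVGet v r c = true ∨ pvGet grid r c ≠ color
            · rw [if_pos hc2]
              refine ih tl v cells ⟨hinv.shape, hinv.vmono, hinv.vdecomp, hinv.cellsVis,
                hinv.cellsNew, hinv.cellsGood, ?_, ?_, ?_⟩ (by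
                  simp only [List.length_cons] at hfuel
                  omega)
              · intro p hp q hnbr hq hqc
                rcases hinv.frontier p hp q hnbr hq hqc with hmem | hv
                · rcases List.mem_cons.1 hmem with rfl | hmem
                  · rcases hc2 with hvis | hcol
                    · exact Or.inr ⟨hq, hvis⟩
                    · exact absurd hqc hcol
                  · exact Or.inl hmem
                · exact Or.inr hv
              · intro q hq
                exact hinv.origin q (List.mem_cons_of_mem _ hq)
              · rcases hinv.seedTrack with hv | hmem
                · exact Or.inl hv
                · rcases List.mem_cons.1 hmem with heq | hmem
                  · rcases hc2 with hvis | hcol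
                    · exact Or.inl ⟨hseedc.1, by rw [heq]; exact hvis⟩
                    · exfalso
                      apply hcol
                      have : pvVal grid (r, c) = color := by rw [← heq]; exact hseedcol
                      exact this
                  · exact Or.inr hmem
            · rw [if_neg hc2]
              push Not at hc2
              obtain ⟨hvis, hcolor⟩ := hc2
              have hvfalse : pvVGet v r c = false := by
                cases hvget : pvVGet v r c
                · rfl
                · exact absurd hvget hvis
              have hvalrc : pvVal grid (r, c) = color := hcolor
              have hcolrc : pvColored grid (r, c) := by
                refine ⟨hinb, ?_, ?_⟩
                · rw [hvalrc, ← hseedcol]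
                  exact hseedc.2.1
                · rw [hvalrc, ← hseedcol]
                  exact hseedc.2.2
              have hreach_rc : pvReach grid seed (r, c) := by
                rcases hinv.origin (r, c) List.mem_cons_self with rfl | ⟨p, hp, hnbr⟩
                · exact Relation.ReflTransGen.refl
                · have hgp := hinv.cellsGood p hp
                  exact Relation.ReflTransGen.tail hgp.2.2
                    ⟨hgp.1, hcolrc, by rw [hgp.2.1, hvalrc], hnbr⟩
              have hvs := pvVrep_vset hinv.shape hinb
              have hshape' := pvShapeV_set hinv.shape hinb.1 hinb.2.2.1
              refine ih _ _ _ ⟨hshape', ?_, ?_, ?_, ?_, ?_, ?_, ?_, ?_⟩ ?_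
              · intro p hp
                exact (hvs p).2 (Or.inr (hinv.vmono p hp))
              · intro p hp
                rcases (hvs p).1 hp with rfl | hp
                · exact Or.inr (List.mem_append_right _ (by simp))
                · rcases hinv.vdecomp p hp with h | h
                  · exact Or.inl h
                  · exact Or.inr (List.mem_append_left _ h)
              · intro p hp
                rcases List.mem_append.1 hp with hp | hp
                · exact (hvs p).2 (Or.inr (hinv.cellsVis p hp))
                · rcases List.mem_singleton.1 hp with rfl
                  exact (hvs _).2 (Or.inl rfl)
              · intro p hp
                rcases List.mem_append.1 hp with hp | hp
                · exact hinv.cellsNew p hp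
                · rcases List.mem_singleton.1 hp with rfl
                  intro hv0
                  have := (hinv.vmono _ hv0).2
                  simp only at this
                  rw [this] at hvfalse
                  exact Bool.true_eq_false.mp hvfalse
              · intro p hp
                rcases List.mem_append.1 hp with hp | hp
                · exact hinv.cellsGood p hp
                · rcases List.mem_singleton.1 hp with rfl
                  exact ⟨hcolrc, hvalrc, hreach_rc⟩
              · intro p hp q hnbr hq hqc
                rcases List.mem_append.1 hp with hp | hp
                · rcases hinv.frontier p hp q hnbr hq hqc with hmem | hv
                  · rcases List.mem_cons.1 hmem with rfl | hmem
                    · exact Or.inr ((hvs _).2 (Or.inl rfl))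
                    · exact Or.inl (by simp [hmem])
                  · exact Or.inr ((hvs q).2 (Or.inr hv))
                · rcases List.mem_singleton.1 hp with rfl
                  left
                  rcases hnbr with h | h | h | h <;> subst h <;> simp
              · intro q hq
                simp only [List.mem_cons] at hq
                rcases hq with rfl | rfl | rfl | rfl | hq
                · exact Or.inr ⟨(r, c), List.mem_append_right _ (by simp), Or.inl rfl⟩
                · exact Or.inr ⟨(r, c), List.mem_append_right _ (by simp), Or.inr (Or.inl rfl)⟩
                · exact Or.inr ⟨(r, c), List.mem_append_right _ (by simp),
                    Or.inr (Or.inr (Or.inl rfl))⟩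
                · exact Or.inr ⟨(r, c), List.mem_append_right _ (by simp),
                    Or.inr (Or.inr (Or.inr rfl))⟩
                · rcases hinv.origin q (List.mem_cons_of_mem _ hq) with h | ⟨p, hp, hnbr⟩
                  · exact Or.inl h
                  · exact Or.inr ⟨p, List.mem_append_left _ hp, hnbr⟩
              · by_cases hseed : seed = (r, c)
                · exact Or.inl ((hvs seed).2 (Or.inl hseed))
                · rcases hinv.seedTrack with hv | hmem
                  · exact Or.inl ((hvs seed).2 (Or.inr hv))
                  · rcases List.mem_cons.1 hmem with heq | hmem
                    · exact absurd heq hseed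
                    · exact Or.inr (by simp [hmem])
              · have hcf := pvCF_vset hinv.shape hinb hvfalse
                simp only [List.length_cons] at hfuel ⊢
                omega


def pvFuelA (grid : List (List Int)) : Nat :=
  5 * ((grid.length : Int).toNat * ((((PySem.List.pyGetD grid 0 []).length : Nat) : Int)).toNat) + 2

def pvScanStep (grid : List (List Int)) (fuel : Nat)
    (st : (List (List Bool)) × List (Int × List (Int × Int))) (p : Int × Int) :
    (List (List Bool)) × List (Int × List (Int × Int)) :=
  let g := pvGet grid p.1 p.2
  if g ≠ 0 ∧ g ≠ 5 ∧ pvVGet st.1 p.1 p.2 = false then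
    let fc := pvFloodA grid (grid.length : Int) ((pvCols grid : Nat) : Int)
      g fuel [p] st.1 []
    (fc.2, st.2 ++ [(g, fc.1)])
  else st

structure pvSInv (grid : List (List Int)) (done : List (Int × Int))
    (s : (List (List Bool)) × List (Int × List (Int × Int))) : Prop where
  shape : pvShapeV grid s.1
  classes : ∀ e ∈ s.2, pvIsClass grid e.2
  cover : ∀ p, pvVrep grid s.1 p → ∃ e ∈ s.2, p ∈ e.2
  colored : ∀ p, pvVrep grid s.1 p → pvColored grid p
  closed : ∀ p q, pvVrep grid s.1 p → pvAdj grid p q → pvVrep grid s.1 q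
  doneCov : ∀ p ∈ done, pvColored grid p → pvVrep grid s.1 p

theorem pvScanStep_inv (grid : List (List Int)) (done : List (Int × Int))
    (s : (List (List Bool)) × List (Int × List (Int × Int))) (p : Int × Int)
    (hinv : pvSInv grid done s) (hinb : pvInB grid p) :
    pvSInv grid (done ++ [p]) (pvScanStep grid (pvFuelA grid) s p) := by
  unfold pvScanStep
  by_cases hcond : pvGet grid p.1 p.2 ≠ 0 ∧ pvGet grid p.1 p.2 ≠ 5 ∧
      pvVGet s.1 p.1 p.2 = false
  · rw [if_pos hcond]
    obtain ⟨hg0, hg5, hvf⟩ := hcond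
    have hcol : pvColored grid p := ⟨hinb, hg0, hg5⟩
    have hF0 : pvFInv grid (pvGet grid p.1 p.2) p s.1 [p] s.1 [] := by
      refine ⟨hinv.shape, fun _ h => h, fun _ h => Or.inl h, by simp, by simp, by simp,
        by simp, ?_, Or.inr (by simp)⟩
      intro q hq
      exact Or.inl (List.mem_singleton.1 hq)
    have hfuel : 5 * pvCF s.1 + 1 < pvFuelA grid := by
      have := pvCF_le (grid := grid) hinv.shape
      unfold pvFuelA
      have he : ((grid.length : Int).toNat *
          ((((PySem.List.pyGetD grid 0 []).length : Nat) : Int)).toNat) =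
          grid.length * pvCols grid := by
        simp [pvCols]
      rw [he]
      omega
    have hF := pvFloodA_run grid (pvGet grid p.1 p.2) p s.1 hcol rfl (pvFuelA grid)
      [p] s.1 [] hF0 (by simpa using hfuel)
    set fc := pvFloodA grid (grid.length : Int) ((pvCols grid : Nat) : Int)
      (pvGet grid p.1 p.2) (pvFuelA grid) [p] s.1 [] with hfc
    have hseedmem : p ∈ fc.1 := by
      rcases hF.seedTrack with hv | hmem
      · rcases hF.vdecomp p hv with h | h
        · exact absurd h.2 (by rw [hvf]; simp)
        · exact h
      · exact absurd hmem (List.not_mem_nil)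
    have hclosedin : ∀ b q, b ∈ fc.1 → pvAdj grid b q → q ∈ fc.1 := by
      intro b q hb hadj
      have hgb := hF.cellsGood b hb
      have hvq : pvVal grid q = pvGet grid p.1 p.2 := by
        rw [← hadj.2.2.1, hgb.2.1]
      rcases hF.frontier b hb q hadj.2.2.2 hadj.2.1.1 hvq with hmem | hv
      · exact absurd hmem (List.not_mem_nil)
      · rcases hF.vdecomp q hv with h | h
        · exfalso
          have := hinv.closed q b h (pvAdj_symm hadj)
          exact hF.cellsNew b hb this
        · exact h
    have hclass : pvIsClass grid fc.1 := by
      refine ⟨p, hcol, fun q => ⟨fun hq => (hF.cellsGood q hq).2.2, fun hq => ?_⟩⟩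
      induction hq with
      | refl => exact hseedmem
      | tail hr hadj ihq => exact hclosedin _ _ ihq hadj
    refine ⟨hF.shape, ?_, ?_, ?_, ?_, ?_⟩
    · intro e he
      rcases List.mem_append.1 he with he | he
      · exact hinv.classes e he
      · rcases List.mem_singleton.1 he with rfl
        exact hclass
    · intro q hq
      rcases hF.vdecomp q hq with h | h
      · obtain ⟨e, he, hqe⟩ := hinv.cover q h
        exact ⟨e, List.mem_append_left _ he, hqe⟩
      · exact ⟨(pvGet grid p.1 p.2, fc.1), List.mem_append_right _ (by simp), h⟩
    · intro q hq
      rcases hF.vdecomp q hq with h | h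
      · exact hinv.colored q h
      · exact (hF.cellsGood q h).1
    · intro q1 q2 hq1 hadj
      rcases hF.vdecomp q1 hq1 with h | h
      · exact hF.vmono _ (hinv.closed q1 q2 h hadj)
      · exact hF.cellsVis _ (hclosedin q1 q2 h hadj)
    · intro x hx hcx
      rcases List.mem_append.1 hx with hx | hx
      · exact hF.vmono _ (hinv.doneCov x hx hcx)
      · rcases List.mem_singleton.1 hx with rfl
        exact hF.cellsVis _ hseedmem
  · rw [if_neg hcond]
    refine ⟨hinv.shape, hinv.classes, hinv.cover, hinv.colored, hinv.closed, ?_⟩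
    intro x hx hcx
    rcases List.mem_append.1 hx with hx | hx
    · exact hinv.doneCov x hx hcx
    · rcases List.mem_singleton.1 hx with rfl
      constructor
      · exact hinb
      · by_cases hvg : pvVGet s.1 x.1 x.2 = false
        · exact absurd ⟨hcx.2.1, hcx.2.2, hvg⟩ hcond
        · cases h : pvVGet s.1 x.1 x.2
          · exact absurd h hvg
          · rfl

theorem pvScanA_fold_inv (grid : List (List Int)) :
    ∀ (ps done : List (Int × Int)) (s : (List (List Bool)) × List (Int × List (Int × Int))),
      pvPositions (grid.length : Int) ((pvCols grid : Nat) : Int) = done ++ ps →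
      pvSInv grid done s →
      pvSInv grid (done ++ ps) (ps.foldl (pvScanStep grid (pvFuelA grid)) s) := by
  intro ps
  induction ps with
  | nil =>
      intro done s _ hinv
      simpa using hinv
  | cons p ps ih =>
      intro done s heq hinv
      have hpmem : p ∈ pvPositions (grid.length : Int) ((pvCols grid : Nat) : Int) := by
        rw [heq]
        simp
      have hInB : pvInB grid p := by
        have := (pvMem_positions _ _ p).1 hpmem
        exact ⟨this.1, this.2.1, this.2.2.1, this.2.2.2⟩
      have hstep := pvScanStep_inv grid done s p hinv hInB
      have heq' : pvPositions (grid.length : Int) ((pvCols grid : Nat) : Int) =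
          (done ++ [p]) ++ ps := by
        rw [heq, List.append_assoc]
        rfl
      have := ih (done ++ [p]) _ heq' hstep
      rw [List.foldl_cons]
      have harr : (done ++ [p]) ++ ps = done ++ p :: ps := by
        rw [List.append_assoc]
        rfl
      rw [harr] at this
      exact this

def pvCompsA (grid : List (List Int)) : List (Int × List (Int × Int)) :=
  (pvScanA grid (grid.length : Int) (((PySem.List.pyGetD grid 0 []).length : Nat) : Int)
    (pvFuelA grid)).2

theorem pvScanA_eq_flat (grid : List (List Int)) :
    pvScanA grid (grid.length : Int) (((PySem.List.pyGetD grid 0 []).length : Nat) : Int)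
      (pvFuelA grid) =
    (pvPositions (grid.length : Int) ((pvCols grid : Nat) : Int)).foldl
      (pvScanStep grid (pvFuelA grid))
      (List.replicate (grid.length : Int).toNat
        (List.replicate ((((PySem.List.pyGetD grid 0 []).length : Nat) : Int)).toNat false), []) := by
  unfold pvScanA pvPositions pvScanStep pvCols
  rw [List.foldl_flatMap]
  simp only [List.foldl_map]

theorem pvInit_shape (grid : List (List Int)) :
    pvShapeV grid (List.replicate (grid.length : Int).toNat
      (List.replicate ((((PySem.List.pyGetD grid 0 []).length : Nat) : Int)).toNat false)) := by
  constructor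
  · simp
  · intro row hrow
    rw [List.eq_of_mem_replicate hrow]
    simp [pvCols]

theorem pvInit_not_vrep (grid : List (List Int)) (p : Int × Int) :
    ¬ pvVrep grid (List.replicate (grid.length : Int).toNat
      (List.replicate ((((PySem.List.pyGetD grid 0 []).length : Nat) : Int)).toNat false)) p := by
  rintro ⟨hinb, hget⟩
  obtain ⟨h0, h1, h2, h3⟩ := hinb
  rw [pvVGet_eq _ h0 h2] at hget
  have ha : p.1.toNat < (grid.length : Int).toNat := by omega
  have hb : p.2.toNat < ((((PySem.List.pyGetD grid 0 []).length : Nat) : Int)).toNat := by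
    unfold pvCols at h3
    omega
  have hrow : (List.replicate (grid.length : Int).toNat
      (List.replicate ((((PySem.List.pyGetD grid 0 []).length : Nat) : Int)).toNat false)).getD
        p.1.toNat [] =
      List.replicate ((((PySem.List.pyGetD grid 0 []).length : Nat) : Int)).toNat false := by
    rw [List.getD_eq_getElem _ _ (by simpa using ha), List.getElem_replicate]
  rw [hrow] at hget
  rw [List.getD_eq_getElem _ _ (by simpa using hb), List.getElem_replicate] at hget
  exact Bool.false_ne_true hget

theorem pvCompsA_classes (grid : List (List Int)) : pvClassList grid (pvCompsA grid) := by
  have hinit : pvSInv grid [] (List.replicate (grid.length : Int).toNat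
      (List.replicate ((((PySem.List.pyGetD grid 0 []).length : Nat) : Int)).toNat false), []) := by
    refine ⟨pvInit_shape grid, by simp, ?_, ?_, ?_, by simp⟩
    · intro p hp
      exact absurd hp (pvInit_not_vrep grid p)
    · intro p hp
      exact absurd hp (pvInit_not_vrep grid p)
    · intro p q hp _
      exact absurd hp (pvInit_not_vrep grid p)
  have hfold := pvScanA_fold_inv grid
    (pvPositions (grid.length : Int) ((pvCols grid : Nat) : Int)) [] _ rfl hinit
  simp only [List.nil_append] at hfold
  rw [← pvScanA_eq_flat] at hfold
  constructor
  · intro e he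
    exact hfold.classes e he
  · intro p hp
    have hpmem : p ∈ pvPositions (grid.length : Int) ((pvCols grid : Nat) : Int) :=
      (pvMem_positions _ _ _).2 ⟨hp.1.1, hp.1.2.1, hp.1.2.2.1, hp.1.2.2.2⟩
    have hv := hfold.doneCov p hpmem hp
    exact hfold.cover p hv


-- ---- assembling the two ports ----

def pvHrowA (grid : List (List Int)) : Int :=
  (PySem.List.pyRange 0 (grid.length : Int) 1).foldl (fun h r =>
    if ((PySem.List.pyRange 0 (((PySem.List.pyGetD grid 0 []).length : Nat) : Int) 1).foldl
        (fun a c => if pvGet grid r c = 5 then a + 1 else a) (0 : Int)) > 1 then r else h) (-1)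

def pvVcolA (grid : List (List Int)) : Int :=
  (PySem.List.pyRange 0 (((PySem.List.pyGetD grid 0 []).length : Nat) : Int) 1).foldl (fun h c =>
    if ((PySem.List.pyRange 0 (grid.length : Int) 1).foldl
        (fun a r => if pvGet grid r c = 5 then a + 1 else a) (0 : Int)) > 1 then c else h) (-1)

def pvHrowB (grid : List (List Int)) : Int :=
  (PySem.List.pyGet? ((PySem.List.pyRange 0 (grid.length : Int) 1).filter (fun r =>
    2 ≤ ((PySem.List.pyRange 0 (((PySem.List.pyGetD grid 0 []).length : Nat) : Int) 1).filter
      (fun c => pvGet grid r c == 5)).length)) (-1)).getD (-1)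

def pvVcolB (grid : List (List Int)) : Int :=
  (PySem.List.pyGet? ((PySem.List.pyRange 0 (((PySem.List.pyGetD grid 0 []).length : Nat) : Int) 1).filter
    (fun c => 2 ≤ ((PySem.List.pyRange 0 (grid.length : Int) 1).filter
      (fun r => pvGet grid r c == 5)).length)) (-1)).getD (-1)

theorem pvHrow_eq (grid : List (List Int)) : pvHrowA grid = pvHrowB grid :=
  pvCross_eq _ _ (fun r c => pvGet grid r c)

theorem pvVcol_eq (grid : List (List Int)) : pvVcolA grid = pvVcolB grid :=
  pvCross_eq _ _ (fun c r => pvGet grid r c)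

theorem pvSolveA_decomp (grid : List (List Int)) :
    solve_63613498 grid = pvFinish grid (pvHrowA grid) (pvVcolA grid) (pvCompsA grid) := rfl

theorem pvSolveB_decomp (grid : List (List Int)) :
    solve_63613498_alt grid = pvFinish grid (pvHrowB grid) (pvVcolB grid) (pvCompsB grid) := rfl

-- ===== VERDICT (by name: the statement is the Claim_ definition above) =====
theorem solve_63613498_spec : Claim_equal_solve_63613498 := by
  intro grid _ hpre
  show solve_63613498 grid = solve_63613498_alt grid
  rw [pvSolveA_decomp, pvSolveB_decomp, pvHrow_eq, pvVcol_eq]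
  exact pvFinish_classlist_eq hpre _ _ (pvCompsA_classes grid) (pvCompsB_classes grid)
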